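-- pv_equiv track=rewrite | github.com/WZMDY/CW3 | CourseWork3.py | find_empty_cell
-- ===== SOURCE A (Python) =====
-- from typing import List, Tuple, Optional
--
-- def find_empty_cell(grid: List[List[int]]) -> Tuple[int, int]:
--     min_options = float('inf')
--     for i in range(len(grid)):
--         for j in range(len(grid[0])):
--             if grid[i][j] == 0:
--                 options = get_viable_options(grid, i, j)
--                 if len(options) < min_options:
--                     min_options = len(options)
--                     empty_cell = (i, j)
--     try:
--         return empty_cell
--     except UnboundLocalError:
--         return None
--
-- def get_viable_options(grid: List[List[int]], row: int, col: int) -> List[int]: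
--     options = set(range(1, len(grid)+1))
--     for i in range(len(grid)):
--         if grid[i][col] in options:
--             options.remove(grid[i][col])
--         if grid[row][i] in options:
--             options.remove(grid[row][i])
--     row_start = (row // int(len(grid)**0.5)) * int(len(grid)**0.5)
--     col_start = (col // int(len(grid)**0.5)) * int(len(grid)**0.5)
--     for i in range(row_start, row_start + int(len(grid)**0.5)):
--         for j in range(col_start, col_start + int(len(grid)**0.5)):
--             if grid[i][j] in options:
--                 options.remove(grid[i][j])
--     return list(options)
-- ===== SOURCE B (Python) =====
-- from typing import List, Tuple, Optional
--
-- def find_empty_cell(grid: List[List[int]]) -> Tuple[int, int]: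
--     n = len(grid)
--     if n == 0:
--         return None
--     m = len(grid[0])
--     s = int(n ** 0.5)
--     zeros = [(i, j) for i in range(n) for j in range(m) if grid[i][j] == 0]
--     if not zeros:
--         return None
--     # used values per column, per zero-containing row, per zero-containing box: each computed ONCE
--     col_used = [{grid[i][j] for i in range(n)} for j in range(m)]
--     row_used = {i: {grid[i][k] for k in range(n)} for i in {i for i, _ in zeros}}
--     boxes = {(i // s * s, j // s * s) for i, j in zeros}
--     box_used = {(rs, cs): {grid[rs + a][cs + b] for a in range(s) for b in range(s)}
--                 for rs, cs in boxes}
--     full = set(range(1, n + 1))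
--     best, best_count = None, n + 1
--     for i, j in zeros:
--         cnt = len(full - (col_used[j] | row_used[i] | box_used[(i // s * s, j // s * s)]))
--         if cnt < best_count:
--             best_count, best = cnt, (i, j)
--     return best
-- ===== Notes on version B (the rewrite author's own statement) =====
-- stated objective: alternative
-- what changed: A rescans the whole row, column and box for every empty cell; B collects the empty cells in one pass and precomputes the used-value set of each column, each zero-containing row and each zero-containing box once, then scores each empty cell by a single set difference (asymptotically less rescanning on zero-dense square grids, but not measurably faster on the generated inputs).
import Mathlib
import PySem

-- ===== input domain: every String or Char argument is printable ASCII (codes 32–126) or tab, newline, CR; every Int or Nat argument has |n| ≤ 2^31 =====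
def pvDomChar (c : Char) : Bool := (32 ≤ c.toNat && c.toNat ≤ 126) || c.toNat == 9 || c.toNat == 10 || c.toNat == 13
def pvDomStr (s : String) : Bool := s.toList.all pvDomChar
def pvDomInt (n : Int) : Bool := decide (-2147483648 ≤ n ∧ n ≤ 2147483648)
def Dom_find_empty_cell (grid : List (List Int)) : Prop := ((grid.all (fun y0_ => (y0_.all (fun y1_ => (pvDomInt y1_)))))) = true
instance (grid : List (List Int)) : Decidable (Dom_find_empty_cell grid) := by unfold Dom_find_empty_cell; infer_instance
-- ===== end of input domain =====

-- B precomputes the used-value sets of each column, each zero-containing row and each zero-containing box once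
-- (objective: alternative — A rescans row+column+box for every empty cell), then counts candidates per empty cell by set difference.


-- ===== PORT A =====
-- int(x ** 0.5) for a Nat x: floor square root (kernel-reducible; agrees with Python's float sqrt for
-- every list length a machine can hold). Used by both ports and by Pre_.
def pvIsqrt (n : Nat) : Nat := ((List.range (n + 1)).filter (fun k => k * k ≤ n)).length - 1

-- float('inf') sentinel: `none` is inf, `some k` a finite count; `c < min_options` is pyLtInf
def pyLtInf (c : Nat) (mo : Option Nat) : Bool :=
  match mo with
  | none => true
  | some k => decide (c < k)

-- Python's int(len(grid)**0.5) is ported as pvIsqrt (exact wherever the float sqrt rounds correctly, i.e. any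
-- list of fewer than ~4.5e15 rows). All indices reached are in range on Pre_; where out-of-range Python raises
-- (excluded by Pre_) the port uses the getD default.
def get_viable_options (grid : List (List Int)) (row col : Nat) : List Int :=
  let n := grid.length
  let s := pvIsqrt n
  let o0 : PySem.Set Int := PySem.Set.ofList (PySem.List.pyRange 1 ((n : Int) + 1) 1)
  let o1 := (List.range n).foldl (fun o i =>
      let v1 := (grid.getD i []).getD col 0
      let o := if PySem.Set.contains o v1 then PySem.Set.discard o v1 else o
      let v2 := (grid.getD row []).getD i 0
      if PySem.Set.contains o v2 then PySem.Set.discard o v2 else o) o0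
  let rs := row / s * s
  let cs := col / s * s
  (List.range s).foldl (fun o a =>
    (List.range s).foldl (fun o b =>
        let v := (grid.getD (rs + a) []).getD (cs + b) 0
        if PySem.Set.contains o v then PySem.Set.discard o v else o) o) o1

def find_empty_cell (grid : List (List Int)) : Option (Int × Int) :=
  let n := grid.length
  let m := (grid.getD 0 []).length
  let st := (List.range n).foldl (fun st i =>
      (List.range m).foldl (fun st j =>
        if (grid.getD i []).getD j 0 = 0 then
          let c := (get_viable_options grid i j).length
          if pyLtInf c st.1 then (some c, some ((i : Int), (j : Int))) else st
        else st) st) ((none : Option Nat), (none : Option (Int × Int)))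
  st.2

-- ===== PORT B =====
def find_empty_cell_alt (grid : List (List Int)) : Option (Int × Int) :=
  let n := grid.length
  if n = 0 then none else
  let m := (grid.getD 0 []).length
  let s := pvIsqrt n
  let zeros := (List.range n).flatMap (fun i =>
      (((List.range m).filter (fun j => (grid.getD i []).getD j 0 == 0)).map (fun j => (i, j))))
  if zeros = [] then none else
  let col_used := (List.range m).map (fun j =>
      PySem.Set.ofList ((List.range n).map (fun i => (grid.getD i []).getD j 0)))
  let row_used := (PySem.Set.ofList (zeros.map (fun p => p.1))).foldl
      (fun d i => d.insert i (PySem.Set.ofList ((List.range n).map (fun k => (grid.getD i []).getD k 0))))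
      PySem.Dict.empty
  let boxes := PySem.Set.ofList (zeros.map (fun p => (p.1 / s * s, p.2 / s * s)))
  let box_used := boxes.foldl
      (fun d key => d.insert key (PySem.Set.ofList ((List.range s).flatMap (fun a =>
          (List.range s).map (fun b => (grid.getD (key.1 + a) []).getD (key.2 + b) 0)))))
      PySem.Dict.empty
  let full : PySem.Set Int := PySem.Set.ofList (PySem.List.pyRange 1 ((n : Int) + 1) 1)
  let res := zeros.foldl (fun st p =>
      let used := PySem.Set.union (PySem.Set.union (col_used.getD p.2 []) (row_used.getD p.1 []))
          (box_used.getD (p.1 / s * s, p.2 / s * s) [])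
      let cnt := (PySem.Set.diff full used).length
      if cnt < st.2 then ((some ((p.1 : Int), (p.2 : Int)) : Option (Int × Int)), cnt) else st)
      ((none : Option (Int × Int)), n + 1)
  res.1

-- ===== PRECONDITION & SPEC =====
-- Pre_ is exactly the set of inputs on which Python's A returns: on ragged grids A hits grid[i][j] out of
-- range (IndexError), and on grids whose side is not a perfect square the box scan of a zero cell can run
-- past the last row/past a row's end (IndexError).
def Pre_find_empty_cell (grid : List (List Int)) : Prop :=
  grid = [] ∨
  ((∀ i, i < grid.length → (grid.getD 0 []).length ≤ (grid.getD i []).length) ∧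
   (∀ i, i < grid.length → ∀ j, j < (grid.getD 0 []).length → (grid.getD i []).getD j 0 = 0 →
      grid.length ≤ (grid.getD i []).length ∧
      (i / pvIsqrt grid.length) * pvIsqrt grid.length + pvIsqrt grid.length ≤ grid.length ∧
      (∀ a, a < pvIsqrt grid.length →
        (j / pvIsqrt grid.length) * pvIsqrt grid.length + pvIsqrt grid.length ≤
          (grid.getD ((i / pvIsqrt grid.length) * pvIsqrt grid.length + a) []).length)))
instance (grid : List (List Int)) : Decidable (Pre_find_empty_cell grid) := by
  unfold Pre_find_empty_cell; infer_instance

def pvWitness_find_empty_cell : List (List Int) := [[1, 0], [0, 2]]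

def Spec_find_empty_cell (grid : List (List Int)) (out : Option (Int × Int)) : Prop := out = find_empty_cell_alt grid
instance (grid : List (List Int)) (out : Option (Int × Int)) : Decidable (Spec_find_empty_cell grid out) := by unfold Spec_find_empty_cell; infer_instance

-- ===== CLAIM (what is proved, stated in full; the proofs are below) =====
def Claim_equal_find_empty_cell : Prop := ∀ (grid : List (List Int)), Dom_find_empty_cell grid → Pre_find_empty_cell grid → Spec_find_empty_cell grid (find_empty_cell grid)

-- ===== LEMMAS AND PROOFS =====

lemma cd_mem (o : PySem.Set Int) (v w : Int) :
    w ∈ (if PySem.Set.contains o v then PySem.Set.discard o v else o) ↔ w ∈ o ∧ w ≠ v := by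
  by_cases h : v ∈ o
  · rw [if_pos ((PySem.Set.contains_iff o v).mpr h), PySem.Set.mem_discard]
  · rw [if_neg (by simpa using (fun hc => h ((PySem.Set.contains_iff o v).mp hc)))]
    constructor
    · intro hw; exact ⟨hw, by rintro rfl; exact h hw⟩
    · exact fun h => h.1

lemma cd_nodup (o : PySem.Set Int) (v : Int) (h : o.Nodup) :
    (if PySem.Set.contains o v then PySem.Set.discard o v else o).Nodup := by
  by_cases hc : PySem.Set.contains o v
  · rw [if_pos hc]; exact PySem.Set.nodup_discard o v h
  · rwa [if_neg hc]

lemma foldl_cd {β : Type} (h : β → Int) :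
    ∀ (l : List β) (o : PySem.Set Int), o.Nodup →
      (l.foldl (fun o x => if PySem.Set.contains o (h x) then PySem.Set.discard o (h x) else o) o).Nodup ∧
      ∀ w, (w ∈ l.foldl (fun o x => if PySem.Set.contains o (h x) then PySem.Set.discard o (h x) else o) o ↔
        w ∈ o ∧ ∀ x ∈ l, w ≠ h x) := by
  intro l
  induction l with
  | nil => intro o ho; simpa using ho
  | cons x t ih =>
    intro o ho
    obtain ⟨hnd, hmem⟩ := ih _ (cd_nodup o (h x) ho)
    refine ⟨hnd, fun w => ?_⟩
    rw [List.foldl_cons, hmem w, cd_mem]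
    constructor
    · rintro ⟨⟨hw, hne⟩, hall⟩; exact ⟨hw, by simpa [hne] using hall⟩
    · rintro ⟨hw, hall⟩
      exact ⟨⟨hw, hall x (by simp)⟩, fun y hy => hall y (by simp [hy])⟩

lemma foldl_cd2 (h1 h2 : Nat → Int) :
    ∀ (l : List Nat) (o : PySem.Set Int), o.Nodup →
      (l.foldl (fun o x =>
        (fun o => if PySem.Set.contains o (h2 x) then PySem.Set.discard o (h2 x) else o)
        (if PySem.Set.contains o (h1 x) then PySem.Set.discard o (h1 x) else o)) o).Nodup ∧
      ∀ w, (w ∈ l.foldl (fun o x =>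
        (fun o => if PySem.Set.contains o (h2 x) then PySem.Set.discard o (h2 x) else o)
        (if PySem.Set.contains o (h1 x) then PySem.Set.discard o (h1 x) else o)) o ↔
        w ∈ o ∧ ∀ x ∈ l, w ≠ h1 x ∧ w ≠ h2 x) := by
  intro l
  induction l with
  | nil => intro o ho; simpa using ho
  | cons x t ih =>
    intro o ho
    obtain ⟨hnd, hmem⟩ := ih _ (cd_nodup _ (h2 x) (cd_nodup o (h1 x) ho))
    refine ⟨hnd, fun w => ?_⟩
    rw [List.foldl_cons, hmem w]
    simp only [cd_mem]
    constructor
    · rintro ⟨⟨⟨hw, hne1⟩, hne2⟩, hall⟩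
      exact ⟨hw, by simpa [hne1, hne2] using hall⟩
    · rintro ⟨hw, hall⟩
      exact ⟨⟨⟨hw, (hall x (by simp)).1⟩, (hall x (by simp)).2⟩, fun y hy => hall y (by simp [hy])⟩

lemma gvo_spec (grid : List (List Int)) (i j : Nat) :
    (get_viable_options grid i j).Nodup ∧
    ∀ w, (w ∈ get_viable_options grid i j ↔
      (1 ≤ w ∧ w < (grid.length : Int) + 1) ∧
      (∀ x, x < grid.length → w ≠ (grid.getD x []).getD j 0 ∧ w ≠ (grid.getD i []).getD x 0) ∧
      (∀ a, a < pvIsqrt grid.length → ∀ b, b < pvIsqrt grid.length →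
        w ≠ (grid.getD (i / pvIsqrt grid.length * pvIsqrt grid.length + a) []).getD
              (j / pvIsqrt grid.length * pvIsqrt grid.length + b) 0)) := by
  have hrw : get_viable_options grid i j =
      ((List.range (pvIsqrt grid.length)).flatMap (fun a =>
          (List.range (pvIsqrt grid.length)).map (fun b => (a, b)))).foldl
        (fun o p =>
          if PySem.Set.contains o ((grid.getD (i / pvIsqrt grid.length * pvIsqrt grid.length + p.1) []).getD
              (j / pvIsqrt grid.length * pvIsqrt grid.length + p.2) 0)
          then PySem.Set.discard o ((grid.getD (i / pvIsqrt grid.length * pvIsqrt grid.length + p.1) []).getD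
              (j / pvIsqrt grid.length * pvIsqrt grid.length + p.2) 0) else o)
        ((List.range grid.length).foldl (fun o x =>
          (fun o => if PySem.Set.contains o ((grid.getD i []).getD x 0)
              then PySem.Set.discard o ((grid.getD i []).getD x 0) else o)
          (if PySem.Set.contains o ((grid.getD x []).getD j 0)
              then PySem.Set.discard o ((grid.getD x []).getD j 0) else o))
          (PySem.Set.ofList (PySem.List.pyRange 1 ((grid.length : Int) + 1) 1))) := by
    rw [get_viable_options, List.foldl_flatMap]
    simp only [List.foldl_map]
  obtain ⟨hnd1, hmem1⟩ := foldl_cd2 (fun x => (grid.getD x []).getD j 0) (fun x => (grid.getD i []).getD x 0)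
    (List.range grid.length) (PySem.Set.ofList (PySem.List.pyRange 1 ((grid.length : Int) + 1) 1))
    (PySem.Set.nodup_ofList _)
  obtain ⟨hnd2, hmem2⟩ := foldl_cd
    (fun p : Nat × Nat => (grid.getD (i / pvIsqrt grid.length * pvIsqrt grid.length + p.1) []).getD
      (j / pvIsqrt grid.length * pvIsqrt grid.length + p.2) 0)
    ((List.range (pvIsqrt grid.length)).flatMap (fun a =>
      (List.range (pvIsqrt grid.length)).map (fun b => (a, b)))) _ hnd1
  rw [hrw]
  refine ⟨hnd2, fun w => ?_⟩
  rw [hmem2 w, hmem1 w]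
  simp only [PySem.Set.mem_ofList, PySem.List.mem_pyRange_one, List.mem_range, List.mem_flatMap,
    List.mem_map]
  constructor
  · rintro ⟨⟨⟨h1, h2⟩, h3⟩, h4⟩
    exact ⟨⟨h1, h2⟩, h3, fun a ha b hb => h4 (a, b) ⟨a, ha, b, hb, rfl⟩⟩
  · rintro ⟨⟨h1, h2⟩, h3, h4⟩
    refine ⟨⟨⟨h1, h2⟩, h3⟩, ?_⟩
    rintro p ⟨a', ha', b', hb', rfl⟩
    exact h4 a' ha' b' hb'
lemma count_eq (grid : List (List Int)) (i j : Nat) :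
    (get_viable_options grid i j).length =
    (PySem.Set.diff (PySem.Set.ofList (PySem.List.pyRange 1 ((grid.length : Int) + 1) 1))
      (PySem.Set.union
        (PySem.Set.union
          (PySem.Set.ofList ((List.range grid.length).map (fun x => (grid.getD x []).getD j 0)))
          (PySem.Set.ofList ((List.range grid.length).map (fun k => (grid.getD i []).getD k 0))))
        (PySem.Set.ofList ((List.range (pvIsqrt grid.length)).flatMap (fun a =>
          (List.range (pvIsqrt grid.length)).map (fun b =>
            (grid.getD (i / pvIsqrt grid.length * pvIsqrt grid.length + a) []).getD
              (j / pvIsqrt grid.length * pvIsqrt grid.length + b) 0)))))).length := by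
  obtain ⟨hnd, hmem⟩ := gvo_spec grid i j
  apply List.Perm.length_eq
  rw [List.perm_ext_iff_of_nodup hnd (PySem.Set.nodup_diff _ _ (PySem.Set.nodup_ofList _))]
  intro w
  rw [hmem w, PySem.Set.mem_diff]
  simp only [PySem.Set.mem_union, PySem.Set.mem_ofList, PySem.List.mem_pyRange_one,
    List.mem_map, List.mem_range, List.mem_flatMap, not_or, not_exists, not_and]
  constructor
  · rintro ⟨h1, h2, h3⟩
    exact ⟨h1, ⟨fun x hx he => (h2 x hx).1 he.symm, fun x hx he => (h2 x hx).2 he.symm⟩,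
      fun a ha b hb he => h3 a ha b hb he.symm⟩
  · rintro ⟨h1, ⟨hc, hr⟩, hb⟩
    exact ⟨h1, fun x hx => ⟨fun he => hc x hx he.symm, fun he => hr x hx he.symm⟩,
      fun a ha b hb' he => hb a ha b hb' he.symm⟩
lemma getD_insert_loop {κ ν : Type} [BEq κ] [LawfulBEq κ] (f : κ → ν) (l : List κ)
    (hl : l.Nodup) (k : κ) (hk : k ∈ l) (d0 : ν) :
    (l.foldl (fun d i => d.insert i (f i)) PySem.Dict.empty).getD k d0 = f k := by
  have hitems : (l.foldl (fun d i => d.insert i (f i)) PySem.Dict.empty).items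
      = l.map (fun a => (a, f a)) := by
    have := PySem.Dict.items_foldl_insert_fresh l (fun a => a) f PySem.Dict.empty
      (by intro a _; simp [PySem.Dict.contains_empty]) (by simpa)
    simpa using this
  apply PySem.Dict.getD_of_mem_items
  · rw [hitems]
    exact List.mem_map.mpr ⟨k, hk, rfl⟩
  · show ((l.foldl (fun d i => d.insert i (f i)) PySem.Dict.empty).items.map (·.1)).Nodup
    rw [hitems, List.map_map]
    simpa [Function.comp_def] using hl

lemma rel_fold (cA cB : Nat × Nat → Nat) (cell : Nat × Nat → Option (Int × Int)) (n : Nat)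
    (hc : ∀ p, cA p = cB p ∧ cB p ≤ n) :
    ∀ (l : List (Nat × Nat)) (a : Option Nat × Option (Int × Int)) (b : (Option (Int × Int)) × Nat),
      a.2 = b.1 →
      (a.1 = none → b.2 = n + 1) →
      (∀ k, a.1 = some k → b.2 = k) →
      (l.foldl (fun st p => if pyLtInf (cA p) st.1 then (some (cA p), cell p) else st) a).2
        = (l.foldl (fun st p => if cB p < st.2 then (cell p, cB p) else st) b).1 := by
  intro l
  induction l with
  | nil => intro a b h1 _ _; simpa using h1
  | cons p t ih =>
    intro a b h1 h2 h3
    rw [List.foldl_cons, List.foldl_cons]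
    rcases ha : a.1 with _ | k
    · have hb2 : b.2 = n + 1 := h2 ha
      have hlt : cB p < b.2 := by rw [hb2]; exact Nat.lt_succ_of_le (hc p).2
      split_ifs with hx <;> [skip; skip] <;> first
      | (refine ih _ _ rfl (by simp) ?_
         intro k' hk'
         simp only [Option.some.injEq] at hk'
         have := (hc p).1
         omega)
      | exact absurd hlt (by simpa using hx)
      | exact absurd hlt hx
      | simp [pyLtInf] at hx
    · have hb2 : b.2 = k := h3 k ha
      have hiff : (pyLtInf (cA p) (some k) = true) ↔ cB p < b.2 := by
        simp only [pyLtInf, decide_eq_true_eq, hb2, (hc p).1]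
      split_ifs with hx hy hy2
      · refine ih _ _ rfl (by simp) ?_
        intro k' hk'
        simp only [Option.some.injEq] at hk'
        have := (hc p).1
        omega
      · exact absurd (hiff.mp hx) hy
      · exact absurd (hiff.mpr hy2) hx
      · exact ih _ _ h1 h2 h3
def pvZeros (grid : List (List Int)) : List (Nat × Nat) :=
  (List.range grid.length).flatMap (fun i =>
    (((List.range (grid.getD 0 []).length).filter (fun j => (grid.getD i []).getD j 0 == 0)).map (fun j => (i, j))))

def pvCB (grid : List (List Int)) (p : Nat × Nat) : Nat :=
  (PySem.Set.diff (PySem.Set.ofList (PySem.List.pyRange 1 ((grid.length : Int) + 1) 1))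
    (PySem.Set.union
      (PySem.Set.union
        (PySem.Set.ofList ((List.range grid.length).map (fun x => (grid.getD x []).getD p.2 0)))
        (PySem.Set.ofList ((List.range grid.length).map (fun k => (grid.getD p.1 []).getD k 0))))
      (PySem.Set.ofList ((List.range (pvIsqrt grid.length)).flatMap (fun a =>
        (List.range (pvIsqrt grid.length)).map (fun b =>
          (grid.getD (p.1 / pvIsqrt grid.length * pvIsqrt grid.length + a) []).getD
            (p.2 / pvIsqrt grid.length * pvIsqrt grid.length + b) 0)))))).length

lemma A_nested (grid : List (List Int)) :
    ∀ (l : List Nat) (init : Option Nat × Option (Int × Int)),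
      l.foldl (fun st i => (List.range (grid.getD 0 []).length).foldl (fun st j =>
        if (grid.getD i []).getD j 0 = 0 then
          let c := (get_viable_options grid i j).length
          if pyLtInf c st.1 then (some c, some ((i : Int), (j : Int))) else st
        else st) st) init
      = ((l.flatMap (fun i => (((List.range (grid.getD 0 []).length).filter
          (fun j => (grid.getD i []).getD j 0 == 0)).map (fun j => (i, j))))).foldl
        (fun st p => if pyLtInf ((get_viable_options grid p.1 p.2).length) st.1
          then (some ((get_viable_options grid p.1 p.2).length), some ((p.1 : Int), (p.2 : Int))) else st) init) := by
  intro l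
  induction l with
  | nil => intro init; rfl
  | cons i t ih =>
    intro init
    rw [List.foldl_cons, List.flatMap_cons, List.foldl_append, ih]
    congr 1
    rw [List.foldl_map]
    exact PySem.List.foldl_ite_eq_foldl_filter (fun j => (grid.getD i []).getD j 0 = 0) _ _ _

lemma A_filtered (grid : List (List Int)) :
    find_empty_cell grid = ((pvZeros grid).foldl
      (fun st p => if pyLtInf ((get_viable_options grid p.1 p.2).length) st.1
        then (some ((get_viable_options grid p.1 p.2).length), some ((p.1 : Int), (p.2 : Int))) else st)
      ((none : Option Nat), (none : Option (Int × Int)))).2 :=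
  congrArg Prod.snd (A_nested grid (List.range grid.length) (none, none))
lemma B_main (grid : List (List Int)) (h0 : ¬ grid.length = 0) (hz : ¬ pvZeros grid = []) :
    find_empty_cell_alt grid = ((pvZeros grid).foldl
      (fun st p => if pvCB grid p < st.2 then (some ((p.1 : Int), (p.2 : Int)), pvCB grid p) else st)
      ((none : Option (Int × Int)), grid.length + 1)).1 := by
  simp only [find_empty_cell_alt]
  rw [← pvZeros]
  rw [if_neg h0, if_neg hz]
  refine congrArg Prod.fst (PySem.List.foldl_congr_mem _ _ _ _ ?_)
  intro acc p hp
  obtain ⟨i, hi, hpm⟩ := List.mem_flatMap.mp hp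
  obtain ⟨j, hjf, rfl⟩ := List.mem_map.mp hpm
  have hjm : j < (grid.getD 0 []).length := List.mem_range.mp (List.mem_filter.mp hjf).1
  have hcol : ((List.range (grid.getD 0 []).length).map (fun j =>
      PySem.Set.ofList ((List.range grid.length).map (fun i => (grid.getD i []).getD j 0)))).getD j []
      = PySem.Set.ofList ((List.range grid.length).map (fun x => (grid.getD x []).getD j 0)) := by
    simp only [List.getD_eq_getElem?_getD] at hjm ⊢
    rw [List.getElem?_map, List.getElem?_range hjm]
    rfl
  have hrow : (((PySem.Set.ofList ((pvZeros grid).map (fun p => p.1))).foldl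
      (fun d i => d.insert i (PySem.Set.ofList ((List.range grid.length).map (fun k => (grid.getD i []).getD k 0))))
      PySem.Dict.empty).getD (i, j).1 []) =
      PySem.Set.ofList ((List.range grid.length).map (fun k => (grid.getD (i, j).1 []).getD k 0)) :=
    getD_insert_loop _ _ (PySem.Set.nodup_ofList _) _
      (by simp only [PySem.Set.mem_ofList]; exact List.mem_map.mpr ⟨(i, j), hp, rfl⟩) _
  have hbox : (((PySem.Set.ofList ((pvZeros grid).map (fun p =>
        (p.1 / pvIsqrt grid.length * pvIsqrt grid.length, p.2 / pvIsqrt grid.length * pvIsqrt grid.length)))).foldl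
      (fun d key => d.insert key (PySem.Set.ofList ((List.range (pvIsqrt grid.length)).flatMap (fun a =>
        (List.range (pvIsqrt grid.length)).map (fun b =>
          (grid.getD (key.1 + a) []).getD (key.2 + b) 0)))))
      PySem.Dict.empty).getD
        ((i, j).1 / pvIsqrt grid.length * pvIsqrt grid.length,
         (i, j).2 / pvIsqrt grid.length * pvIsqrt grid.length) []) =
      PySem.Set.ofList ((List.range (pvIsqrt grid.length)).flatMap (fun a =>
        (List.range (pvIsqrt grid.length)).map (fun b =>
          (grid.getD ((i, j).1 / pvIsqrt grid.length * pvIsqrt grid.length + a) []).getD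
            ((i, j).2 / pvIsqrt grid.length * pvIsqrt grid.length + b) 0))) :=
    getD_insert_loop _ _ (PySem.Set.nodup_ofList _) _
      (by simp only [PySem.Set.mem_ofList]; exact List.mem_map.mpr ⟨(i, j), hp, rfl⟩) _
  simp only [hcol, hrow, hbox, pvCB]
lemma ports_eq (grid : List (List Int)) : find_empty_cell grid = find_empty_cell_alt grid := by
  by_cases h0 : grid.length = 0
  · have hg : grid = [] := List.length_eq_zero_iff.mp h0
    subst hg; rfl
  · by_cases hz : pvZeros grid = []
    · rw [A_filtered grid, hz]
      simp only [find_empty_cell_alt]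
      rw [← pvZeros, if_neg h0, if_pos hz]
      rfl
    · rw [A_filtered grid, B_main grid h0 hz]
      have hfull : (PySem.Set.ofList (PySem.List.pyRange 1 ((grid.length : Int) + 1) 1)).length
          = grid.length := by
        rw [PySem.Set.ofList_eq_self_of_nodup _ (PySem.List.nodup_pyRange_one _ _),
          PySem.List.length_pyRange_one]
        simp
      have hc : ∀ p : Nat × Nat, (get_viable_options grid p.1 p.2).length = pvCB grid p ∧
          pvCB grid p ≤ grid.length := by
        intro p
        refine ⟨count_eq grid p.1 p.2, ?_⟩
        calc (pvCB grid p) ≤ (PySem.Set.ofList (PySem.List.pyRange 1 ((grid.length : Int) + 1) 1)).length := by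
              simpa [pvCB, PySem.Set.diff] using List.length_filter_le _ _
        _ = grid.length := hfull
      exact rel_fold (fun p => (get_viable_options grid p.1 p.2).length) (pvCB grid)
        (fun p => some ((p.1 : Int), (p.2 : Int))) grid.length hc (pvZeros grid)
        (none, none) (none, grid.length + 1) rfl (fun _ => rfl) (by intro k h; cases h)

-- ===== VERDICT (by name: the statement is the Claim_ definition above) =====
theorem find_empty_cell_spec : Claim_equal_find_empty_cell := by
  intro grid _ _
  exact ports_eq grid
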